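-- pv_equiv track=rewrite | github.com/MinSong1227/Training | 42840.py | solution
-- ===== SOURCE A (Python) =====
-- def solution(answers):
--     answer = [0, 0, 0]
--
--     w1 = [1, 2, 3, 4, 5]
--     w2 = [2, 1, 2, 3, 2, 4, 2, 5]
--     w3 = [3, 3, 1, 1, 2, 2, 4, 4, 5, 5]
--
--     for i in range(len(answers)) :
--         if w1[i % 5] == answers[i] :
--             answer[0] += 1
--         if w2[i % 8] == answers[i] :
--             answer[1] += 1
--         if w3[i % 10] == answers[i] :
--             answer[2] += 1
--
--     ans = []
--     if max(answer) == answer[0] :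
--         ans.append(1)
--     if max(answer) == answer[1] :
--         ans.append(2)
--     if max(answer) == answer[2] :
--         ans.append(3)
--     return ans
-- ===== SOURCE B (Python) =====
-- def solution(answers):
--     # Bucket-counting: one hashing pass builds a counter keyed by (position mod 40, answer)
--     # (40 = lcm of the three pattern periods); each score is then a fixed 40-term table lookup sum.
--     keys = [(i % 40, a) for i, a in enumerate(answers)]
--     counts = {}
--     for k in keys:
--         counts[k] = counts.get(k, 0) + 1
--     pats = [[1, 2, 3, 4, 5],
--             [2, 1, 2, 3, 2, 4, 2, 5],
--             [3, 3, 1, 1, 2, 2, 4, 4, 5, 5]]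
--     scores = [sum(counts.get((r, pat[r % len(pat)]), 0) for r in range(40))
--               for pat in pats]
--     best = max(scores)
--     return [k + 1 for k, s in enumerate(scores) if s == best]
-- ===== Notes on version B (the rewrite author's own statement) =====
-- stated objective: alternative
-- what changed: A compares every answer against all three patterns (modular indexing inside one loop with three counters); B instead makes one hashing pass building a counter keyed by (index mod 40, answer) -- 40 = lcm of the pattern periods -- and obtains each score as a fixed 40-term sum of counter lookups, then selects the winners by max over the score list.
import Mathlib
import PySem

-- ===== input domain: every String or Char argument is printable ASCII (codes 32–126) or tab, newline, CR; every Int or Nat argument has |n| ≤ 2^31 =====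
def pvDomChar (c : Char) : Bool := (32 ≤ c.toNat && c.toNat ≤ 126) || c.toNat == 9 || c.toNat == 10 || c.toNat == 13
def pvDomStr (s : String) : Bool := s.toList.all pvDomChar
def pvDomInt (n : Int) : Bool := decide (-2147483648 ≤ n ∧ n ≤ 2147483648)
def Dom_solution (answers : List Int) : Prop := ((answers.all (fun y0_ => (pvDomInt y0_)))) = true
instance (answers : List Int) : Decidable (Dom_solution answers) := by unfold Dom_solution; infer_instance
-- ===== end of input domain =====

-- B replaces A's per-index pattern comparisons by bucket counting: one hashing pass builds a
-- counter keyed by (index mod 40, answer) — 40 = lcm of the pattern periods — and each score is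
-- a fixed 40-term sum of counter lookups (objective: alternative; same O(n) cost).

-- ===== PORT A =====
-- A's single loop over range(len(answers)) updating the three counters of `answer`.
-- answers[i] and wk[i % m] are always in range here, so pyGetD with default 0 is exact.
def solution (answers : List Int) : List Int :=
  let w1 : List Int := [1, 2, 3, 4, 5]
  let w2 : List Int := [2, 1, 2, 3, 2, 4, 2, 5]
  let w3 : List Int := [3, 3, 1, 1, 2, 2, 4, 4, 5, 5]
  let answer :=
    (PySem.List.pyRange 0 (PySem.List.len answers) 1).foldl
      (fun (st : Int × Int × Int) i =>
        let a := PySem.List.pyGetD answers i 0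
        ((if PySem.List.pyGetD w1 (PySem.Int.mod i 5) 0 == a then st.1 + 1 else st.1),
         (if PySem.List.pyGetD w2 (PySem.Int.mod i 8) 0 == a then st.2.1 + 1 else st.2.1),
         (if PySem.List.pyGetD w3 (PySem.Int.mod i 10) 0 == a then st.2.2 + 1 else st.2.2)))
      (0, 0, 0)
  -- max(answer) of the literal 3-element list [a0,a1,a2] is max a0 (max a1 a2)
  let m := max answer.1 (max answer.2.1 answer.2.2)
  (if m == answer.1 then [1] else []) ++
  (if m == answer.2.1 then [2] else []) ++
  (if m == answer.2.2 then [3] else [])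

-- ===== PORT B =====
-- keys = [(i % 40, a) for i, a in enumerate(answers)]; counts built by dict get/insert;
-- each score = sum(counts.get((r, pat[r % len(pat)]), 0) for r in range(40)).
def solution_alt (answers : List Int) : List Int :=
  let keys : List (Int × Int) :=
    (PySem.List.enumerate answers).map (fun p => (PySem.Int.mod p.1 40, p.2))
  let counts : PySem.Dict (Int × Int) Int :=
    keys.foldl (fun d k => d.insert k (d.getD k 0 + 1)) PySem.Dict.empty
  let pats : List (List Int) :=
    [[1, 2, 3, 4, 5], [2, 1, 2, 3, 2, 4, 2, 5], [3, 3, 1, 1, 2, 2, 4, 4, 5, 5]]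
  let scores : List Int := pats.map (fun pat =>
    ((PySem.List.pyRange 0 40 1).map
       (fun r => counts.getD (r, PySem.List.pyGetD pat (PySem.Int.mod r (PySem.List.len pat)) 0) 0)).sum)
  -- max(scores): scores is a literal 3-element list, so max? is some and getD 0 is exact
  let best := (PySem.List.max? scores (fun y => y)).getD 0
  (PySem.List.enumerate scores).filterMap
    (fun p => if p.2 == best then some (p.1 + 1) else none)

-- ===== PRECONDITION & SPEC =====
def Spec_solution (answers : List Int) (out : List Int) : Prop := out = solution_alt answers
instance (answers : List Int) (out : List Int) : Decidable (Spec_solution answers out) := by unfold Spec_solution; infer_instance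

-- ===== CLAIM (what is proved, stated in full; the proofs are below) =====
def Claim_equal_solution : Prop := ∀ (answers : List Int), Dom_solution answers → Spec_solution answers (solution answers)

-- ===== LEMMAS AND PROOFS =====

theorem pv_beq_swap {a b : Int} : (a == b) = (b == a) := by
  by_cases h : a = b
  · simp [h]
  · simp [h]; omega

-- a fold updating the three components of a triple independently splits into three folds
theorem pv_foldl_tri {α : Type} (u1 u2 u3 : Int → α → Int) (l : List α)
    (s1 s2 s3 : Int) :
    l.foldl (fun (st : Int × Int × Int) x => (u1 st.1 x, u2 st.2.1 x, u3 st.2.2 x)) (s1, s2, s3)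
      = (l.foldl u1 s1, l.foldl u2 s2, l.foldl u3 s3) := by
  induction l generalizing s1 s2 s3 with
  | nil => rfl
  | cons x t ih => simpa using ih _ _ _

-- in the 40-element range the key (t, a) matches exactly the row r = t
theorem pv_unique_hit (f : Int → Int) (t a : Int) (h0 : 0 ≤ t) (h1 : t < 40) :
    (PySem.List.pyRange 0 40 1).countP (fun r => ((t, a) == (r, f r))) = if a == f t then 1 else 0 := by
  have hR : PySem.List.pyRange 0 40 1 =
      [0,1,2,3,4,5,6,7,8,9,10,11,12,13,14,15,16,17,18,19,
       20,21,22,23,24,25,26,27,28,29,30,31,32,33,34,35,36,37,38,39] := rfl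
  rw [hR]
  interval_cases t <;> simp [List.countP_cons, Prod.ext_iff]

-- exchange the order of summation: a sum over rows of per-row counts over L
-- equals a sum over L of per-element counts over the rows
theorem pv_sum_countP_comm (R L : List Int) (p : Int → Int → Bool) :
    (R.map (fun r => ((L.countP (fun j => p j r) : Nat) : Int))).sum
      = (L.map (fun j => ((R.countP (fun r => p j r) : Nat) : Int))).sum := by
  induction R with
  | nil => simp
  | cons r R' ih =>
      simp only [List.map_cons, List.sum_cons, List.countP_cons, ih]
      rw [show (fun j => ((List.countP (fun r => p j r) R' + if p j r then 1 else 0 : Nat) : Int))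
            = (fun j => ((List.countP (fun r => p j r) R' : Nat) : Int) + (if p j r then (1:Int) else 0)) by
          funext j; push_cast [apply_ite (fun n : Nat => (n : Int))]; ring]
      rw [PySem.List.sum_map_add_int, PySem.List.sum_map_ite_one_zero]
      ring

theorem pv_mod_mod (j m : Int) (hm : 0 < m) (hd : m ∣ 40) :
    PySem.Int.mod (PySem.Int.mod j 40) m = PySem.Int.mod j m := by
  rw [PySem.Int.mod_eq_emod_of_pos (a := PySem.Int.mod j 40) hm,
      PySem.Int.mod_eq_emod_of_pos (a := j) (b := 40) (by norm_num),
      PySem.Int.mod_eq_emod_of_pos (a := j) (b := m) hm,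
      Int.emod_emod_of_dvd _ hd]

-- B's 40-term lookup sum for one pattern equals A's direct match count
theorem pv_score_eq (answers pat : List Int) (m : Int)
    (hlen : PySem.List.len pat = m) (hm : 0 < m) (hd : m ∣ 40) :
    ((PySem.List.pyRange 0 40 1).map
       (fun r => (((PySem.List.enumerate answers).map
                     (fun p => (PySem.Int.mod p.1 40, p.2))).count
                    (r, PySem.List.pyGetD pat (PySem.Int.mod r (PySem.List.len pat)) 0) : Int))).sum
      = ((PySem.List.pyRange 0 (PySem.List.len answers) 1).countP
           (fun i => PySem.List.pyGetD pat (PySem.Int.mod i m) 0 == PySem.List.pyGetD answers i 0) : Int) := by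
  rw [PySem.List.enumerate_eq_map_pyRange (xs := answers) (d := 0), List.map_map, hlen]
  have hcnt : ∀ q : Int × Int,
      ((PySem.List.pyRange 0 (PySem.List.len answers) 1).map
         ((fun p : Int × Int => (PySem.Int.mod p.1 40, p.2)) ∘
          (fun j => (j, PySem.List.pyGetD answers j 0)))).count q
        = (PySem.List.pyRange 0 (PySem.List.len answers) 1).countP
            (fun j => ((PySem.Int.mod j 40, PySem.List.pyGetD answers j 0) == q)) := by
    intro q
    simp [List.count, List.countP_map, Function.comp_def]
  simp only [hcnt]
  rw [pv_sum_countP_comm (p := fun j r =>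
        ((PySem.Int.mod j 40, PySem.List.pyGetD answers j 0)
           == (r, PySem.List.pyGetD pat (PySem.Int.mod r m) 0)))]
  rw [List.map_congr_left (l := PySem.List.pyRange 0 (PySem.List.len answers) 1)
        (g := fun j => if PySem.List.pyGetD pat (PySem.Int.mod j m) 0 == PySem.List.pyGetD answers j 0
                       then (1:Int) else 0)
        ?_ ]
  · exact PySem.List.sum_map_ite_one_zero _ _
  · intro j hj
    have hj0 : 0 ≤ j := (PySem.List.mem_pyRange_one.mp hj).1
    rw [pv_unique_hit (f := fun r => PySem.List.pyGetD pat (PySem.Int.mod r m) 0)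
          (t := PySem.Int.mod j 40) (a := PySem.List.pyGetD answers j 0)
          (PySem.Int.mod_nonneg j (by norm_num)) (PySem.Int.mod_lt j (by norm_num))]
    rw [pv_mod_mod j m hm hd, pv_beq_swap]
    push_cast [apply_ite (fun n : Nat => (n : Int))]
    rfl

-- the final winner selection: A's append chain vs B's filterMap over enumerate
theorem pv_sel (x1 x2 x3 M : Int) (h : M = x1 ∨ M = x2 ∨ M = x3) :
    (if M == x1 then ([1] : List Int) else []) ++
    (if M == x2 then [2] else []) ++
    (if M == x3 then [3] else [])
      = List.filterMap
          (fun p : Int × Int => if p.2 == M then some (p.1 + 1) else none)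
          [(0, x1), (1, x2), (2, x3)] := by
  simp only [List.filterMap_cons, List.filterMap_nil, pv_beq_swap (b := M)]
  by_cases h1 : M = x1 <;> by_cases h2 : M = x2 <;> by_cases h3 : M = x3 <;>
    simp_all [beq_iff_eq]

theorem pv_final (x1 x2 x3 : Int) :
    (if max x1 (max x2 x3) == x1 then ([1] : List Int) else []) ++
    (if max x1 (max x2 x3) == x2 then [2] else []) ++
    (if max x1 (max x2 x3) == x3 then [3] else [])
      = List.filterMap
          (fun p => if p.2 == (PySem.List.max? [x1, x2, x3] (fun y => y)).getD 0
                    then some (p.1 + 1) else none)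
          (PySem.List.enumerate [x1, x2, x3]) := by
  have hmax : (PySem.List.max? [x1, x2, x3] (fun y => y)).getD 0 = max x1 (max x2 x3) := by
    rw [PySem.List.max?_id_cons]
    simp [List.foldl, max_assoc]
  have hen : PySem.List.enumerate [x1, x2, x3] = [(0, x1), (1, x2), (2, x3)] := by
    simp [PySem.List.enumerate_cons, PySem.List.enumerate_nil]
  rw [hen, hmax]
  exact pv_sel x1 x2 x3 _ (by omega)

-- A's counter triple equals the three direct match counts
theorem pv_counts (answers : List Int) :
    (PySem.List.pyRange 0 (PySem.List.len answers) 1).foldl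
      (fun (st : Int × Int × Int) i =>
        let a := PySem.List.pyGetD answers i 0
        ((if PySem.List.pyGetD [1, 2, 3, 4, 5] (PySem.Int.mod i 5) 0 == a then st.1 + 1 else st.1),
         (if PySem.List.pyGetD [2, 1, 2, 3, 2, 4, 2, 5] (PySem.Int.mod i 8) 0 == a then st.2.1 + 1 else st.2.1),
         (if PySem.List.pyGetD [3, 3, 1, 1, 2, 2, 4, 4, 5, 5] (PySem.Int.mod i 10) 0 == a then st.2.2 + 1 else st.2.2)))
      (0, 0, 0)
      = (((PySem.List.pyRange 0 (PySem.List.len answers) 1).countP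
            (fun i => PySem.List.pyGetD [1, 2, 3, 4, 5] (PySem.Int.mod i 5) 0 == PySem.List.pyGetD answers i 0) : Int),
         ((PySem.List.pyRange 0 (PySem.List.len answers) 1).countP
            (fun i => PySem.List.pyGetD [2, 1, 2, 3, 2, 4, 2, 5] (PySem.Int.mod i 8) 0 == PySem.List.pyGetD answers i 0) : Int),
         ((PySem.List.pyRange 0 (PySem.List.len answers) 1).countP
            (fun i => PySem.List.pyGetD [3, 3, 1, 1, 2, 2, 4, 4, 5, 5] (PySem.Int.mod i 10) 0 == PySem.List.pyGetD answers i 0) : Int)) := by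
  have h := pv_foldl_tri
    (fun s i => if PySem.List.pyGetD [1, 2, 3, 4, 5] (PySem.Int.mod i 5) 0 == PySem.List.pyGetD answers i 0 then s + 1 else s)
    (fun s i => if PySem.List.pyGetD [2, 1, 2, 3, 2, 4, 2, 5] (PySem.Int.mod i 8) 0 == PySem.List.pyGetD answers i 0 then s + 1 else s)
    (fun s i => if PySem.List.pyGetD [3, 3, 1, 1, 2, 2, 4, 4, 5, 5] (PySem.Int.mod i 10) 0 == PySem.List.pyGetD answers i 0 then s + 1 else s)
    (PySem.List.pyRange 0 (PySem.List.len answers) 1) 0 0 0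
  refine h.trans ?_
  rw [PySem.List.foldl_if_add_one, PySem.List.foldl_if_add_one, PySem.List.foldl_if_add_one]
  simp

-- ===== VERDICT (by name: the statement is the Claim_ definition above) =====
theorem solution_spec : Claim_equal_solution := by
  intro answers _
  show solution answers = solution_alt answers
  unfold solution solution_alt
  simp only [PySem.Dict.foldl_insert_getD_add_one_eq_counter, PySem.Dict.getD_counter,
             List.map, pv_counts]
  rw [pv_score_eq answers [1, 2, 3, 4, 5] 5 rfl (by norm_num) (by norm_num),
      pv_score_eq answers [2, 1, 2, 3, 2, 4, 2, 5] 8 rfl (by norm_num) (by norm_num),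
      pv_score_eq answers [3, 3, 1, 1, 2, 2, 4, 4, 5, 5] 10 rfl (by norm_num) (by norm_num)]
  exact pv_final _ _ _
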